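-- pv_equiv track=rewrite | github.com/ayukyo/alltoolkit | Python/gray_code_utils/mod.py | generate_johnson_codes
-- ===== SOURCE A (Python) =====
-- from typing import List, Tuple, Generator, Optional
--
-- def generate_johnson_codes(n: int) -> List[int]:
--     """生成n位Johnson计数器码（Moebius型Gray码）
--
--     Johnson计数器产生更简单的Gray码序列，
--     每次只改变一位，形成循环。
--
--     Args:
--         n: 位数
--
--     Returns:
--         Johnson码值列表
--
--     Examples:
--         >>> generate_johnson_codes(3)
--         [0, 1, 3, 7, 6, 4]
--     """
--     if n <= 0:
--         return [0]
--
--     codes = [0]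
--
--     # 前半段：从最低位开始逐位置1（从右到左）
--     for i in range(n):
--         codes.append(codes[-1] | (1 << i))
--
--     # 后半段：从最低位开始逐位清零（从右到左）
--     for i in range(n):
--         codes.append(codes[-1] & ~(1 << i))
--
--     # 移除最后一个重复的0
--     return codes[:-1]
-- ===== SOURCE B (Python) =====
-- from typing import List
--
--
-- def generate_johnson_codes(n: int) -> List[int]:
--     """n-bit Johnson counter code by closed form: the i-th rising entry is
--     2**i - 1 and the j-th falling entry is 2**n - 2**j."""
--     if n <= 0:
--         return [0]
--     rising = [(1 << i) - 1 for i in range(n + 1)]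
--     falling = [(1 << n) - (1 << j) for j in range(1, n)]
--     return rising + falling
-- ===== Notes on version B (the rewrite author's own statement) =====
-- stated objective: simpler
-- what changed: Replaces the two accumulator loops (repeatedly OR-ing in / AND-ing out single bits of the previous element, then trimming the trailing zero) by per-index closed-form comprehensions: each rising entry is a power of two minus one, each falling entry is the full-width value minus a low power of two.
import Mathlib
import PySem

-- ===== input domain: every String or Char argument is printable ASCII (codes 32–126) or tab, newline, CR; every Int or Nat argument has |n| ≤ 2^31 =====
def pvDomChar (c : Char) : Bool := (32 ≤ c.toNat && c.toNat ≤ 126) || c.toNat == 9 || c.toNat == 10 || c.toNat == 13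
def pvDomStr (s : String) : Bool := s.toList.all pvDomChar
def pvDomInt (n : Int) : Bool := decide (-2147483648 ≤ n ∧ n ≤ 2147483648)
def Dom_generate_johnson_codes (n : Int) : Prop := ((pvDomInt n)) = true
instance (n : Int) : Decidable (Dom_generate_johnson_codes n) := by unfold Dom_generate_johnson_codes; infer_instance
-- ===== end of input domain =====

-- B replaces A's two accumulator loops by per-index closed-form comprehensions (same values; objective: simpler).

-- ===== PORT A =====
-- `1 << i` is ported as `(1 <<< i.toNat : Int)` — exact since every loop index i from range(n) is ≥ 0;
-- `codes[-1]` is ported as `PySem.List.pyGetD cs (-1) 0` — exact since the list is never empty;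
-- `~x` is Lean's Int.not (Python-exact per the prelude); `codes[:-1]` is PySem.List.slice.
def generate_johnson_codes (n : Int) : List Int :=
  if n ≤ 0 then [0]
  else
    -- codes = [0]; for i in range(n): codes.append(codes[-1] | (1 << i))
    let codes : List Int :=
      (PySem.List.pyRange 0 n 1).foldl
        (fun cs i => cs ++ [PySem.Int.bor (PySem.List.pyGetD cs (-1) 0) (1 <<< i.toNat)]) [0]
    -- for i in range(n): codes.append(codes[-1] & ~(1 << i))
    let codes2 : List Int :=
      (PySem.List.pyRange 0 n 1).foldl
        (fun cs i => cs ++ [PySem.Int.band (PySem.List.pyGetD cs (-1) 0) (Int.not (1 <<< i.toNat))]) codes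
    -- return codes[:-1]
    PySem.List.slice codes2 none (some (-1))

-- ===== PORT B =====
-- `1 << i` again ported as `(1 <<< i.toNat : Int)` (all shift amounts are ≥ 0 here).
def generate_johnson_codes_alt (n : Int) : List Int :=
  if n ≤ 0 then [0]
  else
    ((PySem.List.pyRange 0 (n + 1) 1).map (fun i => (1 <<< i.toNat : Int) - 1)) ++
    ((PySem.List.pyRange 1 n 1).map (fun j => (1 <<< n.toNat : Int) - (1 <<< j.toNat : Int)))

-- ===== PRECONDITION & SPEC =====
def Spec_generate_johnson_codes (n : Int) (out : List Int) : Prop := out = generate_johnson_codes_alt n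
instance (n : Int) (out : List Int) : Decidable (Spec_generate_johnson_codes n out) := by unfold Spec_generate_johnson_codes; infer_instance

-- ===== CLAIM (what is proved, stated in full; the proofs are below) =====
def Claim_equal_generate_johnson_codes : Prop := ∀ (n : Int), Dom_generate_johnson_codes n → Spec_generate_johnson_codes n (generate_johnson_codes n)

-- ===== LEMMAS AND PROOFS =====

-- Python's index -1 reads the last element of a nonempty list.
lemma pyGetD_neg_one_concat {α : Type} (xs : List α) (a d : α) :
    PySem.List.pyGetD (xs ++ [a]) (-1) d = a := by
  simp [PySem.List.pyGetD, PySem.List.pyGet?, PySem.List.pyIdx?]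

-- codes[:-1] drops the last element.
lemma slice_neg_one {α : Type} (xs : List α) :
    PySem.List.slice xs none (some (-1)) = xs.dropLast := by
  cases xs with
  | nil => rfl
  | cons x t =>
    simp only [PySem.List.slice, PySem.List.clampIdx, List.dropLast_eq_take]
    norm_num
    rw [if_neg (by omega : ¬ ((t.length : Int) < 0))]
    omega

lemma nat_or_pow (i : Nat) : (2 ^ i - 1) ||| 2 ^ i = 2 ^ (i + 1) - 1 := by
  apply Nat.eq_of_testBit_eq; intro j
  simp only [Nat.testBit_or, Nat.testBit_two_pow_sub_one, Nat.testBit_two_pow]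
  by_cases h1 : j < i <;> by_cases h2 : i = j <;> by_cases h3 : j < i + 1 <;> simp_all <;> omega

lemma nat_and_pow (m i : Nat) (h : i < m) : (2 ^ m - 2 ^ i) &&& 2 ^ i = 2 ^ i := by
  rw [Nat.and_two_pow]
  have h1 : 2 ^ m - 2 ^ i = 2 ^ i * (2 ^ (m - i) - 1) := by
    rw [Nat.mul_sub, mul_one, ← pow_add, Nat.add_sub_cancel' (le_of_lt h)]
  rw [h1, Nat.testBit_two_pow_mul]
  simp
  omega

-- codes[-1] | (1 << i) at the i-th step of the first loop.
lemma bor_step (i : Nat) :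
    PySem.Int.bor (((2 ^ i : Nat) : Int) - 1) ((2 ^ i : Nat) : Int) = ((2 ^ (i + 1) : Nat) : Int) - 1 := by
  have h1 : ((2 ^ i : Nat) : Int) - 1 = (((2 ^ i - 1 : Nat)) : Int) := by
    have : (1:Nat) ≤ 2 ^ i := Nat.one_le_two_pow
    push_cast [this]; ring
  rw [h1, PySem.Int.bor_natCast, nat_or_pow]
  have : (1:Nat) ≤ 2 ^ (i + 1) := Nat.one_le_two_pow
  push_cast [this]; ring

-- codes[-1] & ~(1 << i) at the i-th step of the second loop.
lemma band_step (m i : Nat) (h : i < m) :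
    PySem.Int.band (((2 ^ m : Nat) : Int) - ((2 ^ i : Nat) : Int)) (Int.not ((2 ^ i : Nat) : Int)) =
      ((2 ^ m : Nat) : Int) - ((2 ^ (i + 1) : Nat) : Int) := by
  have hle : (2:Nat) ^ i ≤ 2 ^ m := Nat.pow_le_pow_right (by norm_num) (le_of_lt h)
  have hcast : ((2 ^ m : Nat) : Int) - ((2 ^ i : Nat) : Int) = (((2 ^ m - 2 ^ i : Nat)) : Int) := by
    push_cast [hle]; ring
  have hnot : Int.not (((2 ^ i : Nat)) : Int) = -(((2 ^ i : Nat)) : Int) - 1 := by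
    cases hx : (((2 ^ i : Nat)) : Int) with
    | ofNat k => simp [Int.not]; omega
    | negSucc k => simp [Int.not]
  rw [hcast, hnot]
  have ha : (0:Int) ≤ (((2 ^ m - 2 ^ i : Nat)) : Int) := by positivity
  have hb : ¬ (0:Int) ≤ -(((2 ^ i : Nat)) : Int) - 1 := by
    have : (0:Int) < ((2 ^ i : Nat) : Int) := by positivity
    omega
  simp only [PySem.Int.band, ha, hb, if_true, if_false]
  have h2 : (-(-(((2 ^ i : Nat)) : Int) - 1) - 1).toNat = 2 ^ i := by
    have : (-(-(((2 ^ i : Nat)) : Int) - 1) - 1) = ((2 ^ i : Nat) : Int) := by ring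
    rw [this, Int.toNat_natCast]
  rw [Int.toNat_natCast, h2, nat_and_pow m i h]
  have h3 : 2 ^ m - 2 ^ i - 2 ^ i = 2 ^ m - 2 ^ (i+1) := by
    have : (2:Nat) ^ (i+1) = 2 ^ i + 2 ^ i := by rw [pow_succ]; ring
    omega
  rw [h3]
  have hle1 : (2:Nat) ^ (i+1) ≤ 2 ^ m := Nat.pow_le_pow_right (by norm_num) h
  push_cast [hle1]; ring

-- After the first loop, codes = [2^0-1, 2^1-1, …, 2^m-1].
lemma first_loop (m : Nat) :
    (List.range m).foldl
        (fun cs (i : Nat) => cs ++ [PySem.Int.bor (PySem.List.pyGetD cs (-1) 0) ((2 ^ i : Nat) : Int)]) [0]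
      = (List.range (m + 1)).map (fun (i : Nat) => ((2 ^ i : Nat) : Int) - 1) := by
  induction m with
  | zero => simp [List.range_succ]
  | succ m ih =>
    rw [show List.range (m + 1) = List.range m ++ [m] from List.range_succ,
        List.foldl_append, ih]
    simp only [List.foldl_cons, List.foldl_nil]
    rw [show (List.range (m + 1)).map (fun (i : Nat) => ((2 ^ i : Nat) : Int) - 1)
          = (List.range m).map (fun (i : Nat) => ((2 ^ i : Nat) : Int) - 1) ++ [((2 ^ m : Nat) : Int) - 1] by
        rw [show List.range (m + 1) = List.range m ++ [m] from List.range_succ]; simp]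
    rw [pyGetD_neg_one_concat, bor_step]
    rw [show List.range (m + 1 + 1) = List.range (m + 1) ++ [m + 1] from List.range_succ,
        show List.range (m + 1) = List.range m ++ [m] from List.range_succ]
    simp

-- After k steps of the second loop, codes has grown by [2^m-2^1, …, 2^m-2^k].
lemma second_loop (m k : Nat) (hk : k ≤ m) :
    (List.range k).foldl
        (fun cs (i : Nat) => cs ++ [PySem.Int.band (PySem.List.pyGetD cs (-1) 0) (Int.not ((2 ^ i : Nat) : Int))])
        ((List.range (m + 1)).map (fun (i : Nat) => ((2 ^ i : Nat) : Int) - 1))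
      = (List.range (m + 1)).map (fun (i : Nat) => ((2 ^ i : Nat) : Int) - 1)
        ++ (List.range k).map (fun (j : Nat) => ((2 ^ m : Nat) : Int) - ((2 ^ (j + 1) : Nat) : Int)) := by
  induction k with
  | zero => simp
  | succ k ih =>
    rw [show List.range (k + 1) = List.range k ++ [k] from List.range_succ,
        List.foldl_append, ih (by omega)]
    simp only [List.foldl_cons, List.foldl_nil]
    have hlast : PySem.List.pyGetD
        ((List.range (m + 1)).map (fun (i : Nat) => ((2 ^ i : Nat) : Int) - 1)
          ++ (List.range k).map (fun (j : Nat) => ((2 ^ m : Nat) : Int) - ((2 ^ (j + 1) : Nat) : Int))) (-1) 0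
        = ((2 ^ m : Nat) : Int) - ((2 ^ k : Nat) : Int) := by
      cases k with
      | zero =>
        simp only [List.range_zero, List.map_nil, List.append_nil]
        rw [show (List.range (m + 1)).map (fun (i : Nat) => ((2 ^ i : Nat) : Int) - 1)
              = (List.range m).map (fun (i : Nat) => ((2 ^ i : Nat) : Int) - 1) ++ [((2 ^ m : Nat) : Int) - 1] by
            rw [show List.range (m + 1) = List.range m ++ [m] from List.range_succ]; simp]
        rw [pyGetD_neg_one_concat]
        norm_num
      | succ k' =>
        rw [show (List.range (k' + 1)).map (fun (j : Nat) => ((2 ^ m : Nat) : Int) - ((2 ^ (j + 1) : Nat) : Int))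
              = (List.range k').map (fun (j : Nat) => ((2 ^ m : Nat) : Int) - ((2 ^ (j + 1) : Nat) : Int))
                ++ [((2 ^ m : Nat) : Int) - ((2 ^ (k' + 1) : Nat) : Int)] by
            rw [show List.range (k' + 1) = List.range k' ++ [k'] from List.range_succ]; simp]
        rw [← List.append_assoc, pyGetD_neg_one_concat]
    rw [hlast, band_step m k (by omega)]
    simp

-- ===== VERDICT (by name: the statement is the Claim_ definition above) =====
theorem generate_johnson_codes_spec : Claim_equal_generate_johnson_codes := by
  intro n _
  unfold Spec_generate_johnson_codes
  by_cases hn : n ≤ 0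
  · simp [generate_johnson_codes, generate_johnson_codes_alt, hn]
  · set m := n.toNat with hm
    have hmn : (m : Int) = n := Int.toNat_of_nonneg (by omega)
    have hm1 : 1 ≤ m := by omega
    simp only [generate_johnson_codes, generate_johnson_codes_alt, if_neg hn]
    rw [← hmn]
    rw [show ((m:Int) + 1) = ((m + 1 : Nat) : Int) by push_cast; ring]
    rw [PySem.List.pyRange_zero_nat m, PySem.List.pyRange_zero_nat (m+1), List.foldl_map,
        List.foldl_map, List.map_map, PySem.List.pyRange_one]
    simp only [Int.toNat_natCast, Nat.shiftLeft_eq, one_mul, Function.comp_def]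
    rw [first_loop m, second_loop m m le_rfl, slice_neg_one]
    rw [show List.range m = List.range (m-1) ++ [m-1] by
          conv_lhs => rw [show m = (m-1)+1 by omega]
          exact List.range_succ]
    rw [List.map_append, ← List.append_assoc]
    simp only [List.map_cons, List.map_nil, List.dropLast_concat]
    have hidx : ((m:Int) - 1).toNat = m - 1 := by omega
    rw [hidx, List.map_map]
    have hcast : ∀ k : Nat, ((1 : Int) + (k : Int)).toNat = k + 1 := by intro k; omega
    simp only [Function.comp_def, hcast]
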